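-- pv_equiv track=rewrite | github.com/tjthejuggler/py_habits_widget | py_widget_nums.py | get_days_since_zero_minus
-- ===== SOURCE A (Python) =====
-- def get_days_since_zero_minus(inner_dict):
--     days_since_zero = None
--     sorted_dates = sorted(inner_dict.keys(), reverse=True)
--     for index, date_str in enumerate(sorted_dates[1:]):
--         #index = max(1, index)
--         if inner_dict[date_str] == 0:
--             days_since_zero = index
--             break
--     if days_since_zero is None:
--         days_since_zero = len(sorted_dates)
--     return days_since_zero
-- ===== SOURCE B (Python) =====
-- def get_days_since_zero_minus(inner_dict):
--     # O(n): the answer is determined by the largest zero-valued date below the newest date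
--     if not inner_dict:
--         return 0
--     newest = max(inner_dict)
--     z = None
--     for k, v in inner_dict.items():
--         if v == 0 and k != newest and (z is None or k > z):
--             z = k
--     if z is None:
--         return len(inner_dict)
--     return sum(1 for k in inner_dict if k > z) - 1
-- ===== Notes on version B (the rewrite author's own statement) =====
-- stated objective: faster
-- what changed: Replaces A's descending sort plus scan with a single linear pass that finds the largest zero-valued date below the newest date and then counts the dates above it (O(n) instead of O(n log n)).
import Mathlib
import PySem

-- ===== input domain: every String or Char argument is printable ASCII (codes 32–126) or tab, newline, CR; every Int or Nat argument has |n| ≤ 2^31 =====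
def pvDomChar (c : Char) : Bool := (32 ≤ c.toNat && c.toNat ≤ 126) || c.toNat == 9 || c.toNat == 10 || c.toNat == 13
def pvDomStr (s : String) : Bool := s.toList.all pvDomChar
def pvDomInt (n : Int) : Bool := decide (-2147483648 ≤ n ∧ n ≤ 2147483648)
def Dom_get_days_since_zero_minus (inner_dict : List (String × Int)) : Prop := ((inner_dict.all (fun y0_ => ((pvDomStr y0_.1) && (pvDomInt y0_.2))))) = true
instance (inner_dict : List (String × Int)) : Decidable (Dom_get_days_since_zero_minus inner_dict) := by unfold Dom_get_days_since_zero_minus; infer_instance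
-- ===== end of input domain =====

-- B replaces A's sort of all dates by one linear scan for the largest zero-valued
-- date below the newest date plus a count of dates above it: O(n) instead of O(n log n).


-- ===== PORT A =====
-- the 'for index, date_str in enumerate(...): if inner_dict[date_str] == 0: ... break' loop
-- (inner_dict[date_str] cannot raise KeyError: date_str comes from inner_dict.keys(), so getD is exact)
def pvLoopA (d : PySem.Dict String Int) : List (Int × String) → Option Int
  | [] => none
  | (i, k) :: rest => if d.getD k 0 = 0 then some i else pvLoopA d rest

def get_days_since_zero_minus (inner_dict : List (String × Int)) : Int :=
  let d := PySem.Dict.ofList inner_dict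
  let sorted_dates := PySem.List.sorted d.keys (fun x => x) true
  match pvLoopA d (PySem.List.enumerate (PySem.List.slice sorted_dates (some 1) none) 0) with
  | some i => i
  | none => (sorted_dates.length : Int)

-- ===== PORT B =====
-- 'if v == 0 and k != newest and (z is None or k > z): z = k'
def pvZStep (newest : String) (z : Option String) (p : String × Int) : Option String :=
  if p.2 == 0 && p.1 != newest && (match z with | none => true | some m => decide (m < p.1)) then
    some p.1
  else z

def get_days_since_zero_minus_alt (inner_dict : List (String × Int)) : Int :=
  let d := PySem.Dict.ofList inner_dict
  -- 'if not inner_dict: return 0; newest = max(inner_dict)': max? is none exactly on the empty dict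
  match PySem.List.max? d.keys (fun x => x) with
  | none => 0
  | some newest =>
    match d.items.foldl (pvZStep newest) none with
    | none => (d.size : Int)
    | some z => (d.keys.countP (fun k => decide (z < k)) : Int) - 1

-- ===== PRECONDITION & SPEC =====
def Spec_get_days_since_zero_minus (inner_dict : List (String × Int)) (out : Int) : Prop := out = get_days_since_zero_minus_alt inner_dict
instance (inner_dict : List (String × Int)) (out : Int) : Decidable (Spec_get_days_since_zero_minus inner_dict out) := by unfold Spec_get_days_since_zero_minus; infer_instance

-- ===== CLAIM (what is proved, stated in full; the proofs are below) =====
def Claim_equal_get_days_since_zero_minus : Prop := ∀ (inner_dict : List (String × Int)), Dom_get_days_since_zero_minus inner_dict → Spec_get_days_since_zero_minus inner_dict (get_days_since_zero_minus inner_dict)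

-- ===== LEMMAS AND PROOFS =====

-- the Bool test 'inner_dict[k] == 0'
def pvVal (d : PySem.Dict String Int) (k : String) : Bool := d.getD k 0 == 0
-- the whole guard of B's loop, as a predicate on the key alone
def pvQ (d : PySem.Dict String Int) (newest k : String) : Bool := pvVal d k && k != newest
-- running maximum in Option form
def pvGMax (z : Option String) (k : String) : Option String :=
  some (match z with | none => k | some m => max m k)

theorem pvZStep_eq (d : PySem.Dict String Int) (newest : String)
    (z : Option String) (p : String × Int) (hp : p ∈ d.items) (hnd : d.keys.Nodup) :
    pvZStep newest z p = if pvQ d newest p.1 then pvGMax z p.1 else z := by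
  obtain ⟨k, v⟩ := p
  have hv : d.getD k 0 = v := PySem.Dict.getD_of_mem_items d hp hnd 0
  simp only [pvZStep, pvQ, pvVal, pvGMax, hv]
  cases z with
  | none => by_cases h0 : (v == 0) = true <;> by_cases hn : (k != newest) = true <;> simp [h0, hn]
  | some m =>
    by_cases hlt : m < k
    · have hmx : max m k = k := max_eq_right (le_of_lt hlt)
      by_cases h0 : (v == 0) = true <;> by_cases hn : (k != newest) = true <;>
        simp [h0, hn, hlt, hmx]
    · have hmx : max m k = m := max_eq_left (not_lt.mp hlt)
      by_cases h0 : (v == 0) = true <;> by_cases hn : (k != newest) = true <;>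
        simp [h0, hn, hlt, hmx]

theorem pvZfold_eq (d : PySem.Dict String Int) (newest : String) (hnd : d.keys.Nodup) :
    d.items.foldl (pvZStep newest) none
      = (d.keys.filter (pvQ d newest)).foldl pvGMax none := by
  have h1 : d.items.foldl (pvZStep newest) none
      = d.items.foldl (fun z p => if pvQ d newest p.1 then pvGMax z p.1 else z) none :=
    PySem.List.foldl_congr_mem _ _ _ _ (fun z p hp => pvZStep_eq d newest z p hp hnd)
  have h2 : d.keys.foldl (fun z k => if pvQ d newest k then pvGMax z k else z) none
      = d.items.foldl (fun z p => if pvQ d newest p.1 then pvGMax z p.1 else z) none := by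
    simp only [PySem.Dict.keys, List.foldl_map]
  rw [h1, ← h2, PySem.List.foldl_if_eq_foldl_filter]

theorem pvGMax_some (t : List String) : ∀ m, t.foldl pvGMax (some m) = some (t.foldl max m) := by
  induction t with
  | nil => intro m; rfl
  | cons a t ih => intro m; simp only [List.foldl_cons, pvGMax]; exact ih (max m a)

theorem pvGMax_cons (a : String) (t : List String) :
    (a :: t).foldl pvGMax none = some (t.foldl max a) := by
  simp only [List.foldl_cons, pvGMax]; exact pvGMax_some t a

theorem pvLoopA_enum (d : PySem.Dict String Int) :
    ∀ (xs : List String) (s : Int),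
      pvLoopA d (PySem.List.enumerate xs s)
        = Option.map (fun i => s + (i : Int)) (xs.findIdx? (pvVal d)) := by
  intro xs
  induction xs with
  | nil => intro s; rfl
  | cons k t ih =>
    intro s
    rw [PySem.List.enumerate_cons]
    simp only [pvLoopA, List.findIdx?_cons, pvVal]
    by_cases h : d.getD k 0 = 0
    · simp [h]
    · have hb : (d.getD k 0 == 0) = false := by simp [h]
      simp only [h, if_false, hb, ih (s + 1)]
      cases t.findIdx? (pvVal d) <;> simp <;> try ring

theorem pvCountP_gt (T : List String) (hT : T.Pairwise (· > ·)) :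
    ∀ (i : Nat) (hi : i < T.length) (m : String), T[i] = m →
      T.countP (fun k => decide (m < k)) = i := by
  induction T with
  | nil => intro i hi; simp at hi
  | cons a t ih =>
    have ha : ∀ b ∈ t, b < a := fun b hb => (List.pairwise_cons.1 hT).1 b hb
    have ht := (List.pairwise_cons.1 hT).2
    intro i hi m hm
    match i with
    | 0 =>
      obtain rfl : a = m := hm
      rw [List.countP_cons]
      have h0 : t.countP (fun k => decide (a < k)) = 0 :=
        List.countP_eq_zero.2 (fun b hb => by simpa using not_lt_of_gt (ha b hb))
      rw [h0]
      simp
    | j + 1 =>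
      have hj : j < t.length := by simpa using hi
      have hm' : t[j] = m := by simpa using hm
      rw [List.countP_cons, ih ht j hj m hm']
      have hma : m < a := hm' ▸ ha t[j] (List.getElem_mem hj)
      simp [hma]

theorem pvFindIdx_max (T : List String) (hT : T.Pairwise (· > ·)) (p : String → Bool) :
    ∀ {i : Nat}, T.findIdx? p = some i →
      ∃ (_ : i < T.length) (m : String),
        T[i]? = some m ∧ m ∈ T ∧ p m = true ∧ ∀ b ∈ T, p b = true → b ≤ m := by
  induction T with
  | nil => intro i h; simp at h
  | cons a t ih =>
    have ha : ∀ b ∈ t, b < a := fun b hb => (List.pairwise_cons.1 hT).1 b hb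
    have ht := (List.pairwise_cons.1 hT).2
    intro i h
    rw [List.findIdx?_cons] at h
    by_cases hpa : p a = true
    · rw [if_pos hpa] at h
      obtain rfl : i = 0 := by simpa using h.symm
      refine ⟨by simp, a, by simp, by simp, hpa, ?_⟩
      intro b hb _
      rcases List.mem_cons.1 hb with rfl | hbt
      · exact le_rfl
      · exact le_of_lt (ha b hbt)
    · rw [if_neg hpa] at h
      obtain ⟨j, hj, rfl⟩ := Option.map_eq_some_iff.1 h
      obtain ⟨hjl, m, hjm, hmem, hpm, hmax⟩ := ih ht hj
      refine ⟨by simpa using hjl, m, by simpa using hjm, List.mem_cons_of_mem a hmem, hpm, ?_⟩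
      intro b hb hpb
      rcases List.mem_cons.1 hb with rfl | hbt
      · exact absurd hpb (by simp [hpa])
      · exact hmax b hbt hpb

theorem pvMain (d : PySem.Dict String Int) (hnd : d.keys.Nodup) :
    (match pvLoopA d (PySem.List.enumerate
        (PySem.List.slice (PySem.List.sorted d.keys (fun x => x) true) (some 1) none) 0) with
      | some i => i
      | none => ((PySem.List.sorted d.keys (fun x => x) true).length : Int))
    = (match PySem.List.max? d.keys (fun x => x) with
      | none => (0 : Int)
      | some newest =>
        match d.items.foldl (pvZStep newest) none with
        | none => (d.size : Int)
        | some z => (d.keys.countP (fun k => decide (z < k)) : Int) - 1) := by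
  have hperm : (PySem.List.sorted d.keys (fun x => x) true).Perm d.keys :=
    PySem.List.sorted_perm d.keys (fun x => x) true
  set L := PySem.List.sorted d.keys (fun x => x) true with hL
  have hLnd : L.Nodup := hperm.symm.nodup hnd
  have hLge : L.Pairwise (fun a b => b ≤ a) := PySem.List.sorted_pairwise_rev d.keys (fun x => x)
  have hLgt : L.Pairwise (· > ·) := by
    have := hLge.and hLnd
    exact this.imp (fun h => lt_of_le_of_ne h.1 (Ne.symm h.2))
  have hsize : d.size = d.keys.length := by
    simp [PySem.Dict.size, PySem.Dict.keys]
  match hLc : L with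
  | [] =>
    have hke : d.keys = [] := hperm.symm.eq_nil
    rw [PySem.List.max?_eq_none_iff d.keys (fun x => x) |>.2 hke]
    simp [pvLoopA, PySem.List.slice]
  | h :: T =>
    have hhk : h ∈ d.keys := hperm.mem_iff.1 (by simp)
    -- newest = h
    have hmax : PySem.List.max? d.keys (fun x => x) = some h := by
      rcases hm : PySem.List.max? d.keys (fun x => x) with _ | m
      · exact absurd (PySem.List.max?_eq_none_iff d.keys (fun x => x) |>.1 hm)
          (by intro he; rw [he] at hhk; simp at hhk)
      · have h1 : m ≤ h := PySem.List.key_head_sorted_rev_ge d.keys (fun x => x) hLc m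
          (PySem.List.max?_mem hm)
        have h2 : h ≤ m := PySem.List.max?_isMax hm h hhk
        rw [le_antisymm h1 h2]
    -- A's loop
    have hslice : PySem.List.slice (h :: T) (some 1) none = T := by
      rw [PySem.List.slice_from_one]; rfl
    rw [hslice, pvLoopA_enum d T 0]
    simp only [hmax]
    -- B's fold
    rw [pvZfold_eq d h hnd]
    have hTne : h ∉ T := (List.nodup_cons.1 hLnd).1
    have hhT : ∀ b ∈ T, b < h := fun b hb => (List.pairwise_cons.1 hLgt).1 b hb
    have hTgt : T.Pairwise (· > ·) := (List.pairwise_cons.1 hLgt).2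
    -- the filtered list over keys is a permutation of T.filter (pvVal d)
    have hfT : ((h :: T).filter (pvQ d h)) = T.filter (pvVal d) := by
      have hqh : pvQ d h h = false := by simp [pvQ]
      rw [List.filter_cons, if_neg (by simp [hqh])]
      exact List.filter_congr (fun k hk => by
        have : k ≠ h := fun he => hTne (he ▸ hk)
        simp [pvQ, this])
    have hFperm : (d.keys.filter (pvQ d h)).Perm (T.filter (pvVal d)) := by
      rw [← hfT]; exact (List.Perm.filter _ hperm).symm
    rcases hfi : T.findIdx? (pvVal d) with _ | i
    · -- no zero below the newest date: both return the number of dates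
      have hTf : T.filter (pvVal d) = [] := by
        rw [List.filter_eq_nil_iff]
        intro b hb
        simpa using List.findIdx?_eq_none_iff.1 hfi b hb
      have hF : d.keys.filter (pvQ d h) = [] := by
        have := hFperm; rw [hTf] at this; exact this.eq_nil
      rw [hF]
      simp only [List.foldl_nil]
      rw [hsize, hperm.symm.length_eq]
      simp
    · -- first zero at index i of the tail: B's max is that date and the count above it is i+1
      obtain ⟨hi, W, hiW, hWmem, hpi, hmaxi⟩ := pvFindIdx_max T hTgt (pvVal d) hfi
      have hiW' : T[i] = W := by
        have := hiW; rw [List.getElem?_eq_some_iff] at this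
        obtain ⟨_, hW⟩ := this; exact hW
      have hTi_mem : W ∈ T.filter (pvVal d) := List.mem_filter.2 ⟨hWmem, hpi⟩
      rcases hFc : d.keys.filter (pvQ d h) with _ | ⟨f0, ftail⟩
      · rw [hFc] at hFperm
        exact absurd (hFperm.symm.mem_iff.1 hTi_mem) (by simp)
      · rw [hFc] at hFperm
        rw [pvGMax_cons]
        set M := ftail.foldl max f0 with hM
        have hMmemF : M ∈ f0 :: ftail := by
          rcases PySem.List.foldl_max_mem ftail f0 with he | hm
          · rw [hM, he]; simp
          · exact List.mem_cons_of_mem _ (hM ▸ hm)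
        have hMmax : ∀ y ∈ f0 :: ftail, y ≤ M := by
          intro y hy
          rcases List.mem_cons.1 hy with rfl | hyt
          · exact (PySem.List.le_foldl_max ftail y).1
          · exact (PySem.List.le_foldl_max ftail f0).2 y hyt
        have hMTf : M ∈ T.filter (pvVal d) := hFperm.mem_iff.1 hMmemF
        have hMeq : M = W := by
          have h1 : M ≤ W :=
            hmaxi M (List.mem_filter.1 hMTf).1 (List.mem_filter.1 hMTf).2
          have h2 : W ≤ M := hMmax W (hFperm.mem_iff.2 hTi_mem)
          exact le_antisymm h1 h2
        have hcount : d.keys.countP (fun k => decide (M < k)) = i + 1 := by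
          rw [hperm.symm.countP_eq (fun k => decide (M < k))]
          rw [List.countP_cons, hMeq, pvCountP_gt T hTgt i hi W hiW']
          have : W < h := hhT W hWmem
          simp [this]
        simp only [hcount]
        push_cast
        simp

theorem get_days_since_zero_minus_eq (inner_dict : List (String × Int)) :
    get_days_since_zero_minus inner_dict = get_days_since_zero_minus_alt inner_dict :=
  pvMain (PySem.Dict.ofList inner_dict) (PySem.Dict.nodup_keys_ofList inner_dict)

-- ===== VERDICT (by name: the statement is the Claim_ definition above) =====
theorem get_days_since_zero_minus_spec : Claim_equal_get_days_since_zero_minus := by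
  intro inner_dict _
  unfold Spec_get_days_since_zero_minus
  exact get_days_since_zero_minus_eq inner_dict
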